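-- pv_equiv track=rewrite | github.com/ritik-sri/LeetCode-Problem-Solution-in-PYTHON | Unique rows in boolean matrix - GFG/unique-rows-in-boolean-matrix.py | uniqueRow
-- ===== SOURCE A (Python) =====
-- def uniqueRow(row, col, M):
--     unique_rows = []
--     unique_set = set()
--     for i in range(row):
--         current_row = ""
--         for j in range(col):
--             current_row += str(M[i][j])
--         if current_row not in unique_set:
--             unique_set.add(current_row)
--             unique_rows.append(current_row)
--     return unique_rows
-- ===== SOURCE B (Python) =====
-- def uniqueRow(row, col, M):
--     strs = ["".join(str(M[i][j]) for j in range(col)) for i in range(row)]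
--     out = []
--     rest = strs
--     while rest:
--         head = rest[0]
--         out.append(head)
--         rest = [r for r in rest[1:] if r != head]
--     return out
-- ===== Notes on version B (the rewrite author's own statement) =====
-- stated objective: alternative
-- what changed: Replaces the seen-set accumulator with a stateless dedup: build all row strings first, then repeatedly emit the head and filter its duplicates out of the remainder (no auxiliary set or membership structure).
import Mathlib
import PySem

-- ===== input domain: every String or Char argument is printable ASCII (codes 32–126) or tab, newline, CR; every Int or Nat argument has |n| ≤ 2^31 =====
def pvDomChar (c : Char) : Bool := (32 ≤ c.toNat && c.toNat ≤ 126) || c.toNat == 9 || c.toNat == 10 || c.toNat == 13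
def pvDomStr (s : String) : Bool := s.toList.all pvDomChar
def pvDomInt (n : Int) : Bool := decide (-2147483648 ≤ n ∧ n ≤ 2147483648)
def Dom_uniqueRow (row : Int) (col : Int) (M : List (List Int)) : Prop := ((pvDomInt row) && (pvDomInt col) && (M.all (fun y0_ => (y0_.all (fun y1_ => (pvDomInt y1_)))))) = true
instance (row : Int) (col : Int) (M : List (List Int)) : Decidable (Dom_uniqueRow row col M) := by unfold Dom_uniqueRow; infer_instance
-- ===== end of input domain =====

-- B replaces A's seen-set accumulator with a stateless dedup (emit the head, filter its duplicates from the rest); alternative structure, same results.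

-- ===== PORT A =====
def uniqueRow (row : Int) (col : Int) (M : List (List Int)) : List String :=
  ((PySem.List.pyRange 0 row 1).foldl
    (fun (st : List String × PySem.Set String) i =>
      let current_row := (PySem.List.pyRange 0 col 1).foldl
        (fun s j => s ++ PySem.Int.toStr (PySem.List.pyGetD (PySem.List.pyGetD M i []) j 0)) ""
      if PySem.Set.contains st.2 current_row then st
      else (st.1 ++ [current_row], PySem.Set.add st.2 current_row))
    ([], PySem.Set.empty)).1

-- ===== PORT B =====
-- the while loop of Source B: append the head to out, drop its duplicates from the rest
def dedupLoop (out : List String) (rest : List String) : List String :=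
  match rest with
  | [] => out
  | head :: t => dedupLoop (out ++ [head]) (t.filter (fun r => r != head))
termination_by rest.length
decreasing_by
  simp only [List.length_cons, List.length_unattach]
  exact Nat.lt_succ_of_le (le_trans (List.length_filter_le _ _) (le_of_eq List.length_attach))

def uniqueRow_alt (row : Int) (col : Int) (M : List (List Int)) : List String :=
  let strs := (PySem.List.pyRange 0 row 1).map
    (fun i => PySem.Str.join "" ((PySem.List.pyRange 0 col 1).map
      (fun j => PySem.Int.toStr (PySem.List.pyGetD (PySem.List.pyGetD M i []) j 0))))
  dedupLoop [] strs

-- ===== PRECONDITION & SPEC =====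
-- Pre_ excludes exactly the inputs where A raises IndexError: with a nonempty inner range (col > 0), a row index of range(row) reaching past M, or col past the length of a used row.
def Pre_uniqueRow (row : Int) (col : Int) (M : List (List Int)) : Prop :=
  0 < col → (row ≤ (M.length : Int) ∧ ∀ r ∈ M.take row.toNat, col ≤ (r.length : Int))
instance (row : Int) (col : Int) (M : List (List Int)) : Decidable (Pre_uniqueRow row col M) := by
  unfold Pre_uniqueRow; infer_instance
def pvWitness_uniqueRow : Int × Int × List (List Int) := (3, 2, [[1, 0], [0, 1], [1, 0]])

def Spec_uniqueRow (row : Int) (col : Int) (M : List (List Int)) (out : List String) : Prop := out = uniqueRow_alt row col M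
instance (row : Int) (col : Int) (M : List (List Int)) (out : List String) : Decidable (Spec_uniqueRow row col M out) := by unfold Spec_uniqueRow; infer_instance

-- ===== CLAIM (what is proved, stated in full; the proofs are below) =====
def Claim_equal_uniqueRow : Prop := ∀ (row : Int) (col : Int) (M : List (List Int)), Dom_uniqueRow row col M → Pre_uniqueRow row col M → Spec_uniqueRow row col M (uniqueRow row col M)

-- ===== LEMMAS AND PROOFS =====

lemma contains_add (s : PySem.Set String) (x r : String) :
    PySem.Set.contains (PySem.Set.add s x) r = (PySem.Set.contains s r || r == x) := by
  simp only [PySem.Set.contains_eq_listContains, List.contains_eq_mem, PySem.Set.mem_add, Bool.decide_or]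
  by_cases h : r = x <;> simp [h]

lemma join_empty : PySem.Str.join "" ([] : List String) = "" := by
  apply String.toList_inj.mp
  simp [PySem.Str.toList_join, PySem.Chars.join_nil]

lemma join_cons (x : String) (p : List String) :
    PySem.Str.join "" (x :: p) = x ++ PySem.Str.join "" p := by
  apply String.toList_inj.mp
  cases p with
  | nil => simp [PySem.Str.toList_join, PySem.Chars.join_nil, PySem.Chars.join_singleton, String.toList_append]
  | cons q rest => simp [PySem.Str.toList_join, String.toList_append, PySem.Chars.join_cons_cons]

-- ''.join over a map equals the += fold A performs
lemma foldl_append_eq_join (l : List Int) (g : Int → String) : ∀ (a : String),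
    l.foldl (fun s x => s ++ g x) a = a ++ PySem.Str.join "" (l.map g) := by
  induction l with
  | nil => intro a; simp [join_empty]
  | cons x t ih => intro a; simp only [List.foldl_cons, List.map_cons, ih, join_cons, String.append_assoc]

lemma dedupLoop_cons (acc : List String) (s : String) (t : List String) :
    dedupLoop acc (s :: t) = dedupLoop (acc ++ [s]) (t.filter (fun r => r != s)) := by
  rw [dedupLoop]

-- A's seen-set fold equals B's head-emit-and-filter loop
lemma foldl_set_eq_dedupLoop (L : List String) : ∀ (acc : List String) (seen : PySem.Set String),
    (L.foldl
      (fun (st : List String × PySem.Set String) s =>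
        if PySem.Set.contains st.2 s then st else (st.1 ++ [s], PySem.Set.add st.2 s))
      (acc, seen)).1
    = dedupLoop acc (L.filter (fun s => !(PySem.Set.contains seen s))) := by
  induction L with
  | nil => intro acc seen; simp [dedupLoop]
  | cons s t ih =>
    intro acc seen
    by_cases h : s ∈ seen
    · simp only [List.foldl_cons]
      rw [if_pos (by simpa [PySem.Set.contains_iff] using h), ih]
      congr 1
      simp [h]
    · simp only [List.foldl_cons]
      rw [if_neg (by simpa [PySem.Set.contains_iff] using h), ih,
        List.filter_cons_of_pos (by simp [h]), dedupLoop_cons]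
      congr 1
      rw [List.filter_filter]
      apply List.filter_congr
      intro r _
      rw [contains_add]
      by_cases hr : r = s <;> simp [hr, bne, Bool.and_comm]

lemma main_general (f : Int → String) (R : List Int) :
    (R.foldl (fun (st : List String × PySem.Set String) i =>
        if PySem.Set.contains st.2 (f i) then st else (st.1 ++ [f i], PySem.Set.add st.2 (f i)))
      ([], PySem.Set.empty)).1 = dedupLoop [] (R.map f) := by
  rw [← List.foldl_map (f := f) (g := fun (st : List String × PySem.Set String) s =>
        if PySem.Set.contains st.2 s then st else (st.1 ++ [s], PySem.Set.add st.2 s))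
        (l := R) (init := ([], PySem.Set.empty)),
      foldl_set_eq_dedupLoop]
  congr 1
  simp [PySem.Set.contains_eq_listContains]

-- ===== VERDICT (by name: the statement is the Claim_ definition above) =====
theorem uniqueRow_spec : Claim_equal_uniqueRow := by
  intro row col M _ _
  unfold Spec_uniqueRow uniqueRow uniqueRow_alt
  have h1 : ∀ i : Int, (PySem.List.pyRange 0 col 1).foldl
      (fun s j => s ++ PySem.Int.toStr (PySem.List.pyGetD (PySem.List.pyGetD M i []) j 0)) ""
      = PySem.Str.join "" ((PySem.List.pyRange 0 col 1).map
          (fun j => PySem.Int.toStr (PySem.List.pyGetD (PySem.List.pyGetD M i []) j 0))) := by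
    intro i; rw [foldl_append_eq_join]; simp
  simp only [h1]
  exact main_general _ _
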